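-- pv_equiv track=rewrite | github.com/raeez/chiral-bar-cobar | compute/lib/dt_invariants_bar.py | framed_jordan_quiver_coha_dims
-- ===== SOURCE A (Python) =====
-- from math import comb, factorial, gcd
-- from typing import Dict, List, Optional, Tuple
--
-- def framed_jordan_quiver_coha_dims(N: int, r: int = 1) -> List[int]:
--     r"""CoHA for the framed Jordan quiver (r framings).
--
--     The framed Jordan quiver has one vertex, one loop, and r framing arrows.
--     For r = 1: the moduli space is Hilb^n(C^2), and
--         CoHA character = prod_{n>=1} (1-q^n)^{-1} (same as unframed).
--
--     For r = 2: the moduli is related to Hilb^n(C^2) with extra framing,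
--         CoHA character = prod_{n>=1} (1-q^n)^{-2}.
--
--     For general r:
--         CoHA character = prod_{n>=1} (1-q^n)^{-r}.
--
--     Returns [d_0, d_1, ..., d_N].
--     """
--     coeffs = [0] * (N + 1)
--     coeffs[0] = 1
--
--     for k in range(1, N + 1):
--         # Multiply by (1-q^k)^{-r}
--         # Use the expansion: (1-x)^{-r} = sum_{j>=0} C(r+j-1, j) x^j
--         for j in range(1, N // k + 1):
--             bc = comb(r + j - 1, j)
--             for n in range(N, j * k - 1, -1):
--                 coeffs[n] += bc * coeffs[n - j * k]
--         # Actually, simpler: multiply by (1-q^k)^{-1} r times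
--     # Let me redo this more carefully.
--     coeffs = [0] * (N + 1)
--     coeffs[0] = 1
--
--     for k in range(1, N + 1):
--         for _ in range(r):
--             for n in range(k, N + 1):
--                 coeffs[n] += coeffs[n - k]
--
--     return coeffs
-- ===== SOURCE B (Python) =====
-- def framed_jordan_quiver_coha_dims(N: int, r: int = 1) -> list:
--     """Coefficients d_0..d_N of prod_{k>=1} (1-q^k)^{-r} via the
--     log-derivative recurrence n*d_n = r * sum_{j=1}^{n} sigma(j) * d_{n-j},
--     with the divisor sums sigma(j) filled by a sieve.  O(N^2) total,
--     independent of r (A repeats a prefix-sum pass r times per k)."""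
--     sigma = [0] * (N + 1)
--     for k in range(1, N + 1):
--         for m in range(k, N + 1, k):
--             sigma[m] += k
--     p = [1]
--     for n in range(1, N + 1):
--         s = 0
--         for j in range(1, n + 1):
--             s += sigma[j] * p[n - j]
--         p.append(r * s // n)
--     return p
-- ===== Notes on version B (the rewrite author's own statement) =====
-- stated objective: faster
-- what changed: Replaces A's r-fold prefix-sum passes per factor (multiply by (1-q^k)^{-1} r times for each k) by the log-derivative recurrence n*d_n = r*sum_j sigma(j)*d_{n-j}, with the divisor sums sigma(j) precomputed by a sieve.
import Mathlib
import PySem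

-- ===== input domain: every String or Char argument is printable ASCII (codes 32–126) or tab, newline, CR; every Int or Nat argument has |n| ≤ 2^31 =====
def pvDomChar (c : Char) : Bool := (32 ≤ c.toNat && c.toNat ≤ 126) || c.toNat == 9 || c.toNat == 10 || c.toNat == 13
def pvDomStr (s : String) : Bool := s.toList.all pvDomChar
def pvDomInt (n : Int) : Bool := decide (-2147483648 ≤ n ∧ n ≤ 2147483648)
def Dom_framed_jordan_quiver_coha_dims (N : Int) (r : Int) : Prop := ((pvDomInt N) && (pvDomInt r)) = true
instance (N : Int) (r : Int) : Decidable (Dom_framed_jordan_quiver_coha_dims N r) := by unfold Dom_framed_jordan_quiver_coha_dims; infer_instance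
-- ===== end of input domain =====

-- B replaces A's r repeated prefix-sum passes per factor by the log-derivative
-- recurrence n*d_n = r*Σ_j σ(j)*d_{n-j} with a divisor-sum sieve (objective: faster).

-- ===== PORT A =====

-- math.comb n k: exact for 0 ≤ n and 0 ≤ k (Python raises ValueError on a negative
-- argument; those inputs are excluded by Pre_, where this value is never used anyway).
def pyComb (n k : Int) : Int := (Nat.choose n.toNat k.toNat : Int)

-- Transliteration of A.  The first block (A's own dead code: its result is rebound
-- before use, exactly as in the Python) is kept, shadowed like Python's rebinding.
-- coeffs[n] / coeffs[n] = v use pyGetD/pySetD: all indices are in range on Pre_.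
def framed_jordan_quiver_coha_dims (N : Int) (r : Int) : List Int :=
  let coeffs : List Int := (List.replicate (N + 1).toNat 0).set 0 1
  let coeffs := (PySem.List.pyRange 1 (N + 1) 1).foldl (fun c k =>
    (PySem.List.pyRange 1 (PySem.Int.floordiv N k + 1) 1).foldl (fun c j =>
      let bc := pyComb (r + j - 1) j
      (PySem.List.pyRange N (j * k - 1) (-1)).foldl (fun c n =>
        PySem.List.pySetD c n (PySem.List.pyGetD c n 0 + bc * PySem.List.pyGetD c (n - j * k) 0)) c) c) coeffs
  -- "Let me redo this more carefully." — Python rebinds coeffs, discarding the above.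
  let _dead := coeffs
  let coeffs : List Int := (List.replicate (N + 1).toNat 0).set 0 1
  let coeffs := (PySem.List.pyRange 1 (N + 1) 1).foldl (fun c k =>
    (PySem.List.pyRange 0 r 1).foldl (fun c _ =>
      (PySem.List.pyRange k (N + 1) 1).foldl (fun c n =>
        PySem.List.pySetD c n (PySem.List.pyGetD c n 0 + PySem.List.pyGetD c (n - k) 0)) c) c) coeffs
  coeffs

-- ===== PORT B =====

-- Transliteration of Source B: divisor-sum sieve for sigma, then the recurrence
-- p_n = r * (Σ_{j=1}^{n} sigma[j] * p[n-j]) // n, appending to p.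
def framed_jordan_quiver_coha_dims_alt (N : Int) (r : Int) : List Int :=
  let sigma := (PySem.List.pyRange 1 (N + 1) 1).foldl (fun s k =>
    (PySem.List.pyRange k (N + 1) k).foldl (fun s m =>
      PySem.List.pySetD s m (PySem.List.pyGetD s m 0 + k)) s)
    ((List.replicate (N + 1).toNat 0 : List Int))
  (PySem.List.pyRange 1 (N + 1) 1).foldl (fun p n =>
    let s := (PySem.List.pyRange 1 (n + 1) 1).foldl (fun s j =>
      s + PySem.List.pyGetD sigma j 0 * PySem.List.pyGetD p (n - j) 0) 0
    p ++ [PySem.Int.floordiv (r * s) n]) [1]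

-- ===== PRECONDITION & SPEC =====

-- Exactly the inputs on which Python A returns: for N < 0 the assignment coeffs[0] = 1
-- hits an empty list (IndexError), and for N ≥ 1, r < 0 the first block's
-- comb(r + j - 1, j) raises ValueError (math.comb rejects negative arguments).
def Pre_framed_jordan_quiver_coha_dims (N : Int) (r : Int) : Prop :=
  0 ≤ N ∧ (0 ≤ r ∨ N = 0)
instance (N : Int) (r : Int) : Decidable (Pre_framed_jordan_quiver_coha_dims N r) := by
  unfold Pre_framed_jordan_quiver_coha_dims; infer_instance

def pvWitness_framed_jordan_quiver_coha_dims : Int × Int := (6, 2)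

def Spec_framed_jordan_quiver_coha_dims (N : Int) (r : Int) (out : List Int) : Prop := out = framed_jordan_quiver_coha_dims_alt N r
instance (N : Int) (r : Int) (out : List Int) : Decidable (Spec_framed_jordan_quiver_coha_dims N r out) := by unfold Spec_framed_jordan_quiver_coha_dims; infer_instance

-- ===== CLAIM (what is proved, stated in full; the proofs are below) =====
def Claim_equal_framed_jordan_quiver_coha_dims : Prop := ∀ (N : Int) (r : Int), Dom_framed_jordan_quiver_coha_dims N r → Pre_framed_jordan_quiver_coha_dims N r → Spec_framed_jordan_quiver_coha_dims N r (framed_jordan_quiver_coha_dims N r)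

-- ===== LEMMAS AND PROOFS =====
noncomputable def psG (k : ℕ) : PowerSeries ℤ := PowerSeries.mk fun n => if k ∣ n then 1 else 0
noncomputable def psE (k : ℕ) : PowerSeries ℤ := PowerSeries.mk fun n => if k ∣ (n+1) then (k:ℤ) else 0

lemma coeff_G (k n : ℕ) : (PowerSeries.coeff n) (psG k) = if k ∣ n then 1 else 0 := by
  simp [psG]

lemma G_cancel (k : ℕ) (hk : 0 < k) : (1 - PowerSeries.X ^ k) * psG k = 1 := by
  ext n
  rw [sub_mul, one_mul, map_sub]
  rcases lt_or_ge n k with h | h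
  · have hx : (PowerSeries.coeff n) (PowerSeries.X ^ k * psG k) = 0 := by
      rw [PowerSeries.coeff_X_pow_mul']
      simp [Nat.not_le_of_lt h]
    rw [hx, sub_zero, coeff_G]
    rcases Nat.eq_zero_or_pos n with rfl | hn
    · simp
    · have : ¬ k ∣ n := Nat.not_dvd_of_pos_of_lt hn h
      simp [this]
      omega
  · have hx : (PowerSeries.coeff n) (PowerSeries.X ^ k * psG k) = (PowerSeries.coeff (n - k)) (psG k) := by
      rw [PowerSeries.coeff_X_pow_mul']
      simp [h]
    rw [hx, coeff_G, coeff_G]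
    have hdvd : k ∣ n ↔ k ∣ n - k := by
      constructor
      · intro hd; exact (Nat.dvd_sub hd dvd_rfl)
      · intro hd; have := Nat.dvd_add hd (dvd_refl k); rwa [Nat.sub_add_cancel h] at this
    have hn0 : n ≠ 0 := by omega
    by_cases hd : k ∣ n
    · rw [if_pos hd, if_pos (hdvd.mp hd)]; simp [hn0]
    · rw [if_neg hd, if_neg (fun c => hd (hdvd.mpr c))]; simp [hn0]

lemma mulG_coeff (k : ℕ) (hk : 0 < k) (f : PowerSeries ℤ) (n : ℕ) :
    (PowerSeries.coeff n) (f * psG k) =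
      (PowerSeries.coeff n) f + (if k ≤ n then (PowerSeries.coeff (n - k)) (f * psG k) else 0) := by
  have hf : f = (1 - PowerSeries.X ^ k) * (f * psG k) := by
    rw [mul_comm (1 - PowerSeries.X ^ k), mul_assoc, mul_comm (psG k), G_cancel k hk, mul_one]
  have h1 : (PowerSeries.coeff n) f =
      (PowerSeries.coeff n) (f * psG k) -
        (if k ≤ n then (PowerSeries.coeff (n - k)) (f * psG k) else 0) := by
    conv_lhs => rw [hf]
    rw [sub_mul, one_mul, map_sub, PowerSeries.coeff_X_pow_mul']
  rw [h1]; ring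

lemma derivG (k : ℕ) (hk : 0 < k) :
    (psG k).derivativeFun = psE k * psG k := by
  have key : (1 - PowerSeries.X ^ k) * (psG k).derivativeFun = psE k := by
    ext n
    rw [sub_mul, one_mul, map_sub, PowerSeries.coeff_X_pow_mul',
      PowerSeries.coeff_derivativeFun, coeff_G, psE, PowerSeries.coeff_mk]
    rcases lt_or_ge n k with h | h
    · rw [if_neg (Nat.not_le_of_lt h), sub_zero]
      by_cases hd : k ∣ n + 1
      · have hle : k ≤ n + 1 := Nat.le_of_dvd (by omega) hd
        have hnk : n + 1 = k := by omega
        rw [if_pos hd, if_pos hd]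
        have : ((n:ℤ) + 1) = (k:ℤ) := by exact_mod_cast congrArg (Nat.cast : ℕ → ℤ) hnk
        rw [one_mul, this]
      · simp [hd]
    · rw [if_pos h, PowerSeries.coeff_derivativeFun, coeff_G]
      have hnk : n - k + 1 = n + 1 - k := by omega
      have hdvd : k ∣ n + 1 ↔ k ∣ n + 1 - k := by
        constructor
        · intro hd; exact Nat.dvd_sub hd dvd_rfl
        · intro hd; have := Nat.dvd_add hd (dvd_refl k); rwa [Nat.sub_add_cancel (by omega)] at this
      rw [hnk]
      by_cases hd : k ∣ n + 1
      · rw [if_pos hd, if_pos (hdvd.mp hd), if_pos hd]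
        have hcast : ((n - k : ℕ) : ℤ) = (n : ℤ) - (k : ℤ) := by
          have : k ≤ n := h
          push_cast [Nat.cast_sub this]; ring
        rw [one_mul, one_mul, hcast]; ring
      · rw [if_neg hd, if_neg (fun c => hd (hdvd.mpr c)), if_neg hd]; simp
  calc (psG k).derivativeFun
      = ((1 - PowerSeries.X ^ k) * psG k) * (psG k).derivativeFun := by rw [G_cancel k hk, one_mul]
    _ = psE k * psG k := by
        rw [mul_comm (1 - PowerSeries.X ^ k) (psG k), mul_assoc, key, mul_comm]

lemma logD_mul (f g s t : PowerSeries ℤ) (hf : f.derivativeFun = s * f)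
    (hg : g.derivativeFun = t * g) : (f * g).derivativeFun = (s + t) * (f * g) := by
  rw [PowerSeries.derivativeFun_mul, hf, hg, smul_eq_mul, smul_eq_mul]; ring

lemma logD_pow (f s : PowerSeries ℤ) (hf : f.derivativeFun = s * f) (m : ℕ) :
    (f ^ m).derivativeFun = (PowerSeries.C (m : ℤ) * s) * (f ^ m) := by
  induction m with
  | zero => simp [PowerSeries.derivativeFun_one]
  | succ m ih =>
      rw [pow_succ]
      rw [logD_mul _ _ _ _ ih hf]
      simp only [Nat.cast_add, Nat.cast_one, map_add, map_one]
      ring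

noncomputable def psF (Nn rn : ℕ) : PowerSeries ℤ := ∏ k ∈ Finset.Icc 1 Nn, psG k ^ rn
noncomputable def psH (Nn rn : ℕ) : PowerSeries ℤ :=
  ∑ k ∈ Finset.Icc 1 Nn, PowerSeries.C (rn : ℤ) * psE k

lemma logD_F (Nn rn : ℕ) : (psF Nn rn).derivativeFun = psH Nn rn * psF Nn rn := by
  rw [psF, psH]
  have : ∀ S : Finset ℕ, (∀ k ∈ S, 0 < k) →
      (∏ k ∈ S, psG k ^ rn).derivativeFun =
        (∑ k ∈ S, PowerSeries.C (rn : ℤ) * psE k) * ∏ k ∈ S, psG k ^ rn := by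
    intro S
    induction S using Finset.induction_on with
    | empty => simp [PowerSeries.derivativeFun_one]
    | insert a S ha ih =>
        intro hpos
        rw [Finset.prod_insert ha, Finset.sum_insert ha]
        have hG := logD_pow (psG a) (psE a) (derivG a (hpos a (Finset.mem_insert_self a S))) rn
        have hrest := ih (fun k hk => hpos k (Finset.mem_insert_of_mem hk))
        rw [logD_mul _ _ _ _ hG hrest]
  exact this _ (fun k hk => (Finset.mem_Icc.mp hk).1)

lemma coeff_H (Nn rn j : ℕ) :
    (PowerSeries.coeff j) (psH Nn rn) =
      (rn : ℤ) * ∑ k ∈ Finset.Icc 1 Nn, (if k ∣ (j + 1) then (k : ℤ) else 0) := by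
  rw [psH, map_sum, Finset.mul_sum]
  refine Finset.sum_congr rfl fun k _ => ?_
  rw [PowerSeries.coeff_C_mul, psE, PowerSeries.coeff_mk]

lemma coeff_F_zero (Nn rn : ℕ) : (PowerSeries.coeff 0) (psF Nn rn) = 1 := by
  rw [psF, PowerSeries.coeff_zero_eq_constantCoeff, map_prod]
  refine Finset.prod_eq_one fun k _ => ?_
  rw [map_pow]
  have : PowerSeries.constantCoeff (psG k) = 1 := by
    rw [psG, ← PowerSeries.coeff_zero_eq_constantCoeff, PowerSeries.coeff_mk]
    simp
  rw [this, one_pow]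

lemma rec_F (Nn rn : ℕ) (n : ℕ) (hn : 0 < n) :
    (n : ℤ) * (PowerSeries.coeff n) (psF Nn rn) =
      ∑ j ∈ Finset.Icc 1 n,
        ((rn : ℤ) * ∑ k ∈ Finset.Icc 1 Nn, (if k ∣ j then (k : ℤ) else 0)) *
          (PowerSeries.coeff (n - j)) (psF Nn rn) := by
  obtain ⟨m, rfl⟩ : ∃ m, n = m + 1 := ⟨n - 1, by omega⟩
  have h1 := PowerSeries.coeff_derivativeFun (psF Nn rn) m
  rw [logD_F, PowerSeries.coeff_mul, Finset.Nat.sum_antidiagonal_eq_sum_range_succ_mk] at h1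
  have h3 : ∑ j ∈ Finset.Icc 1 (m + 1),
        ((rn : ℤ) * ∑ k ∈ Finset.Icc 1 Nn, (if k ∣ j then (k : ℤ) else 0)) *
          (PowerSeries.coeff (m + 1 - j)) (psF Nn rn) =
      ∑ i ∈ Finset.range (m + 1), (PowerSeries.coeff i) (psH Nn rn) *
          (PowerSeries.coeff (m - i)) (psF Nn rn) := by
    have hset : Finset.Icc 1 (m + 1) = Finset.Ico 1 (m + 2) := Finset.val_inj.mp rfl
    rw [hset, Finset.sum_Ico_eq_sum_range]
    have h4 : m + 2 - 1 = m + 1 := by omega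
    rw [h4]
    refine Finset.sum_congr rfl fun i hi => ?_
    rw [coeff_H]
    have e1 : (1:ℕ) + i = i + 1 := by omega
    have e2 : m + 1 - (i + 1) = m - i := by omega
    rw [e1, e2]
  rw [h3]
  have h5 : ∑ i ∈ Finset.range (Nat.succ m), (PowerSeries.coeff (i, m - i).1) (psH Nn rn) *
      (PowerSeries.coeff (i, m - i).2) (psF Nn rn) =
      ∑ i ∈ Finset.range (m + 1), (PowerSeries.coeff i) (psH Nn rn) *
          (PowerSeries.coeff (m - i)) (psF Nn rn) := rfl
  rw [h5] at h1
  push_cast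
  linarith [h1]


def PvRep (c : List Int) (M : ℕ) (g : ℕ → ℤ) : Prop :=
  c.length = M + 1 ∧ ∀ i : ℕ, i ≤ M → c.getD i 0 = g i

lemma pvRep_ext {c : List Int} {M : ℕ} {g : ℕ → ℤ} (h : PvRep c M g) :
    c = (List.range (M + 1)).map g := by
  apply List.ext_getElem
  · simp [h.1]
  · intro i h1 h2
    have hi : i ≤ M := by rw [h.1] at h1; omega
    have := h.2 i hi
    rw [List.getD_eq_getElem c 0 h1] at this
    rw [this, List.getElem_map, List.getElem_range]

lemma pvRep_congr {c : List Int} {M : ℕ} {g g' : ℕ → ℤ} (h : PvRep c M g)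
    (hgg : ∀ i ≤ M, g i = g' i) : PvRep c M g' :=
  ⟨h.1, fun i hi => (h.2 i hi).trans (hgg i hi)⟩

lemma pvRep_set {c : List Int} {M : ℕ} {g : ℕ → ℤ} (h : PvRep c M g) (m : ℕ) (hm : m ≤ M) (v : ℤ) :
    PvRep (c.set m v) M (fun i => if i = m then v else g i) := by
  refine ⟨by simp [h.1], fun i hi => ?_⟩
  show (c.set m v).getD i 0 = if i = m then v else g i
  by_cases him : i = m
  · subst him
    rw [if_pos rfl, List.getD_eq_getElem _ 0 (by simp [h.1]; omega)]
    rw [List.getElem_set_self]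
  · rw [if_neg him, ← h.2 i hi]
    rw [List.getD_eq_getElem _ 0 (by simp [h.1]; omega), List.getD_eq_getElem _ 0 (by rw [h.1]; omega)]
    rw [List.getElem_set_ne (by omega)]



-- One ascending in-place prefix pass with stride kk multiplies the represented
-- series by psG kk.
lemma passA (M kk : ℕ) (hk : 0 < kk) (f : PowerSeries ℤ) (c : List Int)
    (hRep : PvRep c M (fun i => (PowerSeries.coeff i) f)) :
    PvRep ((PySem.List.pyRange (kk : ℤ) ((M : ℤ) + 1) 1).foldl
        (fun c n => PySem.List.pySetD c n
          (PySem.List.pyGetD c n 0 + PySem.List.pyGetD c (n - (kk : ℤ)) 0)) c)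
      M (fun i => (PowerSeries.coeff i) (f * psG kk)) := by
  have hmix0 : ∀ i : ℕ, i < kk →
      (PowerSeries.coeff i) (f * psG kk) = (PowerSeries.coeff i) f := by
    intro i hi
    rw [mulG_coeff kk hk f i, if_neg (by omega), add_zero]
  rw [PySem.List.pyRange_one, List.foldl_map]
  have hT : (((M : ℤ) + 1) - (kk : ℤ)).toNat = M + 1 - kk := by omega
  rw [hT]
  have main : ∀ t : ℕ, t ≤ M + 1 - kk →
      PvRep ((List.range t).foldl
          (fun (c : List Int) (n : ℕ) => PySem.List.pySetD c ((kk : ℤ) + (n : ℤ))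
            (PySem.List.pyGetD c ((kk : ℤ) + (n : ℤ)) 0 +
              PySem.List.pyGetD c (((kk : ℤ) + (n : ℤ)) - (kk : ℤ)) 0)) c) M
        (fun i => if i < kk + t then (PowerSeries.coeff i) (f * psG kk)
                  else (PowerSeries.coeff i) f) := by
    intro t
    induction t with
    | zero =>
        intro _
        refine pvRep_congr hRep fun i hi => ?_
        by_cases hik : i < kk + 0
        · rw [if_pos hik, hmix0 i (by omega)]
        · rw [if_neg hik]
    | succ t ih =>
        intro ht
        have hd := ih (by omega)
        clear ih
        set d := (List.range t).foldl
          (fun (c : List Int) (n : ℕ) => PySem.List.pySetD c ((kk : ℤ) + (n : ℤ))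
            (PySem.List.pyGetD c ((kk : ℤ) + (n : ℤ)) 0 +
              PySem.List.pyGetD c (((kk : ℤ) + (n : ℤ)) - (kk : ℤ)) 0)) c with hdef
        rw [List.range_succ, List.foldl_append, List.foldl_cons, List.foldl_nil, ← hdef]
        have hkt : kk + t ≤ M := by omega
        have e1 : ((kk : ℤ) + (t : ℕ)) = ((kk + t : ℕ) : ℤ) := by push_cast; ring
        have e2 : (((kk : ℤ) + (t : ℕ)) - (kk : ℤ)) = ((t : ℕ) : ℤ) := by ring
        rw [e2, e1, PySem.List.pySetD_natCast, PySem.List.pyGetD_natCast, PySem.List.pyGetD_natCast]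
        have v1 : d.getD (kk + t) 0 = (PowerSeries.coeff (kk + t)) f := by
          have := hd.2 (kk + t) hkt
          simp only [] at this
          rwa [if_neg (by omega)] at this
        have v2 : d.getD t 0 = (PowerSeries.coeff t) (f * psG kk) := by
          have := hd.2 t (by omega)
          simp only [] at this
          rwa [if_pos (by omega)] at this
        rw [v1, v2]
        have hval : (PowerSeries.coeff (kk + t)) f + (PowerSeries.coeff t) (f * psG kk)
            = (PowerSeries.coeff (kk + t)) (f * psG kk) := by
          rw [mulG_coeff kk hk f (kk + t), if_pos (by omega)]
          have e3 : kk + t - kk = t := by omega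
          rw [e3]
        rw [hval]
        refine pvRep_congr (pvRep_set hd (kk + t) hkt _) fun i hi => ?_
        by_cases hie : i = kk + t
        · rw [if_pos hie, hie, if_pos (by omega)]
        · rw [if_neg hie]
          by_cases hlt : i < kk + t
          · rw [if_pos hlt, if_pos (by omega)]
          · rw [if_neg hlt, if_neg (by omega)]
  have hfin := main (M + 1 - kk) (le_refl _)
  refine pvRep_congr hfin fun i hi => ?_
  by_cases hlt : i < kk + (M + 1 - kk)
  · rw [if_pos hlt]
  · rw [if_neg hlt, hmix0 i (by omega)]


-- Repeating the pass r times (Python's 'for _ in range(r)') multiplies by psG kk ^ r.toNat.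
lemma rfoldA (M kk : ℕ) (hk : 0 < kk) (r : ℤ) (f : PowerSeries ℤ) (c : List Int)
    (hRep : PvRep c M (fun i => (PowerSeries.coeff i) f)) :
    PvRep ((PySem.List.pyRange 0 r 1).foldl (fun c _ =>
        (PySem.List.pyRange (kk : ℤ) ((M : ℤ) + 1) 1).foldl
          (fun c n => PySem.List.pySetD c n
            (PySem.List.pyGetD c n 0 + PySem.List.pyGetD c (n - (kk : ℤ)) 0)) c) c)
      M (fun i => (PowerSeries.coeff i) (f * psG kk ^ (r.toNat))) := by
  have gen : ∀ (l : List Int) (f : PowerSeries ℤ) (c : List Int),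
      PvRep c M (fun i => (PowerSeries.coeff i) f) →
      PvRep (l.foldl (fun c _ =>
          (PySem.List.pyRange (kk : ℤ) ((M : ℤ) + 1) 1).foldl
            (fun c n => PySem.List.pySetD c n
              (PySem.List.pyGetD c n 0 + PySem.List.pyGetD c (n - (kk : ℤ)) 0)) c) c)
        M (fun i => (PowerSeries.coeff i) (f * psG kk ^ l.length)) := by
    intro l
    induction l with
    | nil =>
        intro f c hc
        refine pvRep_congr hc fun i hi => ?_
        rw [List.length_nil, pow_zero, mul_one]
    | cons a l ih =>
        intro f c hc
        rw [List.foldl_cons]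
        have hstep := passA M kk hk f c hc
        have := ih (f * psG kk) _ hstep
        refine pvRep_congr this fun i hi => ?_
        rw [List.length_cons]
        congr 1
        rw [mul_assoc, ← pow_succ']
  have := gen (PySem.List.pyRange 0 r 1) f c hRep
  refine pvRep_congr this fun i hi => ?_
  congr 2
  rw [PySem.List.length_pyRange_one]
  congr 1
  omega

-- A's outer loop over k = 1..M builds psF M r.toNat from 1.
lemma outerA (M : ℕ) (r : ℤ) (c : List Int)
    (hRep : PvRep c M (fun i => (PowerSeries.coeff i) (1 : PowerSeries ℤ))) :
    PvRep ((PySem.List.pyRange 1 ((M : ℤ) + 1) 1).foldl (fun c k =>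
        (PySem.List.pyRange 0 r 1).foldl (fun c _ =>
          (PySem.List.pyRange k ((M : ℤ) + 1) 1).foldl
            (fun c n => PySem.List.pySetD c n
              (PySem.List.pyGetD c n 0 + PySem.List.pyGetD c (n - k) 0)) c) c) c)
      M (fun i => (PowerSeries.coeff i) (psF M r.toNat)) := by
  rw [PySem.List.pyRange_one 1 ((M : ℤ) + 1), List.foldl_map]
  have hT : (((M : ℤ) + 1) - 1).toNat = M := by omega
  rw [hT]
  have main : ∀ t : ℕ, t ≤ M →
      PvRep ((List.range t).foldl (fun (c : List Int) (k : ℕ) =>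
          (PySem.List.pyRange 0 r 1).foldl (fun c _ =>
            (PySem.List.pyRange ((1 : ℤ) + (k : ℤ)) ((M : ℤ) + 1) 1).foldl
              (fun c n => PySem.List.pySetD c n
                (PySem.List.pyGetD c n 0 + PySem.List.pyGetD c (n - ((1 : ℤ) + (k : ℤ))) 0)) c) c) c)
        M (fun i => (PowerSeries.coeff i) (psF t r.toNat)) := by
    intro t
    induction t with
    | zero =>
        intro _
        refine pvRep_congr hRep fun i hi => ?_
        rw [psF, show Finset.Icc 1 0 = (∅ : Finset ℕ) by simp, Finset.prod_empty]
    | succ t ih =>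
        intro ht
        have hd := ih (by omega)
        rw [List.range_succ, List.foldl_append, List.foldl_cons, List.foldl_nil]
        have e1 : ((1 : ℤ) + (t : ℕ)) = (((t + 1 : ℕ)) : ℤ) := by push_cast; ring
        rw [e1]
        have hstep := rfoldA M (t + 1) (by omega) r (psF t r.toNat) _ hd
        refine pvRep_congr hstep fun i hi => ?_
        congr 1
        rw [psF, psF, Finset.prod_Icc_succ_top (by omega : 1 ≤ t + 1)]
  exact main M (le_refl M)


-- B's inner sieve loop: add kk at every positive multiple of kk up to M.
lemma sieveInner (M kk : ℕ) (hk : 0 < kk) (gI : ℕ → ℤ) (s : List Int)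
    (hRep : PvRep s M gI) :
    PvRep ((PySem.List.pyRange (kk : ℤ) ((M : ℤ) + 1) (kk : ℤ)).foldl
        (fun s m => PySem.List.pySetD s m (PySem.List.pyGetD s m 0 + (kk : ℤ))) s)
      M (fun j => gI j + if kk ∣ j ∧ 1 ≤ j then (kk : ℤ) else 0) := by
  rw [PySem.List.pyRange_of_pos _ _ (by exact_mod_cast hk : (0 : ℤ) < (kk : ℤ))]
  have hcnt : (if (kk : ℤ) < (M : ℤ) + 1
      then (((M : ℤ) + 1 - (kk : ℤ) + (kk : ℤ) - 1) / (kk : ℤ)).toNat else 0) = M / kk := by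
    by_cases h : (kk : ℤ) < (M : ℤ) + 1
    · rw [if_pos h]
      have e : ((M : ℤ) + 1 - (kk : ℤ) + (kk : ℤ) - 1) = ((M : ℕ) : ℤ) := by ring
      rw [e, ← Int.natCast_ediv, Int.toNat_natCast]
    · rw [if_neg h]
      symm
      apply Nat.div_eq_of_lt
      omega
  rw [hcnt, List.foldl_map]
  have main : ∀ t : ℕ, t ≤ M / kk →
      PvRep ((List.range t).foldl (fun (s : List Int) (i : ℕ) =>
          PySem.List.pySetD s ((kk : ℤ) + (kk : ℤ) * (i : ℤ))
            (PySem.List.pyGetD s ((kk : ℤ) + (kk : ℤ) * (i : ℤ)) 0 + (kk : ℤ))) s) M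
        (fun j => gI j + if kk ∣ j ∧ 1 ≤ j ∧ j ≤ kk * t then (kk : ℤ) else 0) := by
    intro t
    induction t with
    | zero =>
        intro _
        refine pvRep_congr hRep fun j hj => ?_
        have : ¬ (kk ∣ j ∧ 1 ≤ j ∧ j ≤ kk * 0) := by
          rintro ⟨h1, h2, h3⟩; omega
        rw [if_neg this, add_zero]
    | succ t ih =>
        intro ht
        have hd := ih (by omega)
        clear ih
        rw [List.range_succ, List.foldl_append, List.foldl_cons, List.foldl_nil]
        set d := (List.range t).foldl (fun (s : List Int) (i : ℕ) =>
          PySem.List.pySetD s ((kk : ℤ) + (kk : ℤ) * (i : ℤ))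
            (PySem.List.pyGetD s ((kk : ℤ) + (kk : ℤ) * (i : ℤ)) 0 + (kk : ℤ))) s with hdef
        have hm : kk * (t + 1) ≤ M := by
          rw [Nat.mul_comm]
          exact (Nat.le_div_iff_mul_le hk).mp ht
        have e1 : ((kk : ℤ) + (kk : ℤ) * (t : ℤ)) = ((kk * (t + 1) : ℕ) : ℤ) := by
          push_cast; ring
        rw [e1, PySem.List.pySetD_natCast, PySem.List.pyGetD_natCast]
        have v1 : d.getD (kk * (t + 1)) 0 = gI (kk * (t + 1)) := by
          have := hd.2 (kk * (t + 1)) hm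
          simp only [] at this
          rw [this, if_neg ?_, add_zero]
          rintro ⟨h1, h2, h3⟩
          have := Nat.le_of_mul_le_mul_left h3 hk
          omega
        rw [v1]
        refine pvRep_congr (pvRep_set hd (kk * (t + 1)) hm _) fun j hj => ?_
        by_cases hje : j = kk * (t + 1)
        · rw [if_pos hje, hje, if_pos ⟨Dvd.intro _ rfl, Nat.mul_pos hk t.succ_pos, le_refl _⟩]
        · rw [if_neg hje]
          by_cases hcond : kk ∣ j ∧ 1 ≤ j ∧ j ≤ kk * t
          · have h3' : j ≤ kk * (t + 1) :=
              le_trans hcond.2.2 (Nat.mul_le_mul_left kk (by omega))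
            rw [if_pos hcond, if_pos ⟨hcond.1, hcond.2.1, h3'⟩]
          · have hneg : ¬ (kk ∣ j ∧ 1 ≤ j ∧ j ≤ kk * (t + 1)) := by
              rintro ⟨h1, h2, h3⟩
              refine hcond ⟨h1, h2, ?_⟩
              obtain ⟨q, rfl⟩ := h1
              have hq : q ≠ t + 1 := by rintro rfl; exact hje rfl
              have hq1 : q ≤ t + 1 := Nat.le_of_mul_le_mul_left h3 hk
              exact Nat.mul_le_mul_left kk (by omega)
            rw [if_neg hcond, if_neg hneg]
  have hfin := main (M / kk) (le_refl _)
  refine pvRep_congr hfin fun j hj => ?_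
  congr 1
  by_cases hcond : kk ∣ j ∧ 1 ≤ j
  · have hle : j ≤ kk * (M / kk) := by
      obtain ⟨⟨q, rfl⟩, h2⟩ := hcond
      have hq : q ≤ M / kk := (Nat.le_div_iff_mul_le hk).mpr (by rw [Nat.mul_comm]; exact hj)
      exact Nat.mul_le_mul_left kk hq
    rw [if_pos ⟨hcond.1, hcond.2, hle⟩, if_pos hcond]
  · rw [if_neg (by rintro ⟨h1, h2, h3⟩; exact hcond ⟨h1, h2⟩), if_neg hcond]

-- The divisor-sum array built by B's sieve: partial sums over the factors 1..K.
noncomputable def sigPart (K j : ℕ) : ℤ :=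
  ∑ k ∈ Finset.Icc 1 K, (if k ∣ j ∧ 1 ≤ j then (k : ℤ) else 0)

lemma sieveOuter (M : ℕ) :
    PvRep ((PySem.List.pyRange 1 ((M : ℤ) + 1) 1).foldl (fun s k =>
        (PySem.List.pyRange k ((M : ℤ) + 1) k).foldl
          (fun s m => PySem.List.pySetD s m (PySem.List.pyGetD s m 0 + k)) s)
        (List.replicate (M + 1) (0 : ℤ)))
      M (fun j => sigPart M j) := by
  rw [PySem.List.pyRange_one 1 ((M : ℤ) + 1), List.foldl_map]
  have hT : (((M : ℤ) + 1) - 1).toNat = M := by omega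
  rw [hT]
  have main : ∀ t : ℕ, t ≤ M →
      PvRep ((List.range t).foldl (fun (s : List Int) (k : ℕ) =>
          (PySem.List.pyRange ((1 : ℤ) + (k : ℤ)) ((M : ℤ) + 1) ((1 : ℤ) + (k : ℤ))).foldl
            (fun s m => PySem.List.pySetD s m
              (PySem.List.pyGetD s m 0 + ((1 : ℤ) + (k : ℤ)))) s)
          (List.replicate (M + 1) (0 : ℤ))) M
        (fun j => sigPart t j) := by
    intro t
    induction t with
    | zero =>
        intro _
        have hrep0 : PvRep (List.replicate (M + 1) (0 : ℤ)) M (fun _ => (0 : ℤ)) :=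
          ⟨by simp, fun j hj => by
            rw [List.getD_eq_getElem _ 0 (by simp; omega), List.getElem_replicate]⟩
        refine pvRep_congr hrep0 fun j hj => ?_
        rw [sigPart, show Finset.Icc 1 0 = (∅ : Finset ℕ) by simp, Finset.sum_empty]
    | succ t ih =>
        intro ht
        have hd := ih (by omega)
        clear ih
        rw [List.range_succ, List.foldl_append, List.foldl_cons, List.foldl_nil]
        have e1 : ((1 : ℤ) + (t : ℤ)) = (((t + 1 : ℕ)) : ℤ) := by push_cast; ring
        rw [e1]
        have hstep := sieveInner M (t + 1) (by omega) _ _ hd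
        refine pvRep_congr hstep fun j hj => ?_
        rw [sigPart, sigPart, Finset.sum_Icc_succ_top (by omega : 1 ≤ t + 1)]
  exact main M (le_refl M)


-- B's main loop: the recurrence p_n = r * (Σ_j sigma[j] * p[n-j]) // n rebuilds the
-- coefficients of psF M r.toNat.
lemma mainB (M : ℕ) (r : ℤ) (hr : 0 ≤ r ∨ M = 0) (sigma : List Int)
    (hsig : PvRep sigma M (fun j => sigPart M j)) :
    (PySem.List.pyRange 1 ((M : ℤ) + 1) 1).foldl (fun p n =>
        p ++ [PySem.Int.floordiv (r * ((PySem.List.pyRange 1 (n + 1) 1).foldl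
          (fun s j => s + PySem.List.pyGetD sigma j 0 * PySem.List.pyGetD p (n - j) 0) 0)) n]) [1]
      = (List.range (M + 1)).map (fun i => (PowerSeries.coeff i) (psF M r.toNat)) := by
  rw [PySem.List.pyRange_one 1 ((M : ℤ) + 1), List.foldl_map]
  have hT : (((M : ℤ) + 1) - 1).toNat = M := by omega
  rw [hT]
  have main : ∀ t : ℕ, t ≤ M →
      (List.range t).foldl (fun (p : List Int) (n : ℕ) =>
        p ++ [PySem.Int.floordiv (r * ((PySem.List.pyRange 1 (((1 : ℤ) + (n : ℤ)) + 1) 1).foldl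
          (fun s j => s + PySem.List.pyGetD sigma j 0 *
            PySem.List.pyGetD p (((1 : ℤ) + (n : ℤ)) - j) 0) 0)) ((1 : ℤ) + (n : ℤ))]) [1]
      = (List.range (t + 1)).map (fun i => (PowerSeries.coeff i) (psF M r.toNat)) := by
    intro t
    induction t with
    | zero =>
        intro _
        rw [List.range_zero, List.foldl_nil, List.range_one, List.map_singleton, coeff_F_zero]
    | succ t ih =>
        intro ht
        have hM1 : 1 ≤ M := by omega
        have hr' : 0 ≤ r := hr.resolve_right (by omega)
        have hp := ih (by omega)
        rw [List.range_succ, List.foldl_append, List.foldl_cons, List.foldl_nil, hp]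
        set dd := fun i => (PowerSeries.coeff i) (psF M r.toNat) with hdd
        -- the inner sum
        have e1 : ((1 : ℤ) + (t : ℤ)) = (((t + 1 : ℕ)) : ℤ) := by push_cast; ring
        rw [e1]
        have hsum : ((PySem.List.pyRange 1 ((((t + 1 : ℕ)) : ℤ) + 1) 1).foldl
            (fun s j => s + PySem.List.pyGetD sigma j 0 *
              PySem.List.pyGetD ((List.range (t + 1)).map dd) ((((t + 1 : ℕ)) : ℤ) - j) 0) 0)
            = ∑ i ∈ Finset.range (t + 1), sigPart M (i + 1) * dd (t - i) := by
          rw [PySem.List.foldl_add, zero_add, PySem.List.pyRange_one, List.map_map]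
          have hT2 : ((((t + 1 : ℕ)) : ℤ) + 1 - 1).toNat = t + 1 := by omega
          rw [hT2]
          have hmap : ∀ i ∈ List.range (t + 1),
              ((fun j => PySem.List.pyGetD sigma j 0 *
                PySem.List.pyGetD ((List.range (t + 1)).map dd) ((((t + 1 : ℕ)) : ℤ) - j) 0) ∘
                  (fun k : ℕ => (1 : ℤ) + (k : ℤ))) i
              = sigPart M (i + 1) * dd (t - i) := by
            intro i hi
            have hilt : i < t + 1 := List.mem_range.mp hi
            have ei : ((1 : ℤ) + (i : ℤ)) = (((i + 1 : ℕ)) : ℤ) := by push_cast; ring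
            have ej : ((((t + 1 : ℕ)) : ℤ) - (((i + 1 : ℕ)) : ℤ)) = (((t - i : ℕ)) : ℤ) := by
              push_cast [Nat.cast_sub (by omega : i ≤ t)]; ring
            simp only [Function.comp_apply]
            rw [ei, ej, PySem.List.pyGetD_natCast, PySem.List.pyGetD_natCast]
            congr 1
            · rw [hsig.2 (i + 1) (by omega)]
            · rw [List.getD_eq_getElem _ 0 (by simp only [List.length_map, List.length_range]; omega),
                List.getElem_map, List.getElem_range]
          rw [List.map_congr_left hmap]
          exact rfl
        rw [hsum]
        -- the recurrence
        have hrec := rec_F M r.toNat (t + 1) (by omega)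
        have hIcc : ∑ j ∈ Finset.Icc 1 (t + 1),
            (((r.toNat : ℤ)) * ∑ k ∈ Finset.Icc 1 M, (if k ∣ j then (k : ℤ) else 0)) *
              (PowerSeries.coeff (t + 1 - j)) (psF M r.toNat)
            = ∑ i ∈ Finset.range (t + 1),
                ((r.toNat : ℤ)) * sigPart M (i + 1) * dd (t - i) := by
          have hset : Finset.Icc 1 (t + 1) = Finset.Ico 1 (t + 2) := Finset.val_inj.mp rfl
          rw [hset, Finset.sum_Ico_eq_sum_range]
          have h4 : t + 2 - 1 = t + 1 := by omega
          rw [h4]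
          refine Finset.sum_congr rfl fun i hi => ?_
          have e5 : (1 : ℕ) + i = i + 1 := by omega
          have e6 : t + 1 - (1 + i) = t - i := by omega
          rw [e6, e5, sigPart]
          have e7 : ∀ k : ℕ, (k ∣ i + 1 ∧ 1 ≤ i + 1) ↔ k ∣ i + 1 :=
            fun k => and_iff_left (by omega)
          rw [hdd]
          simp only [e7]
        rw [hIcc] at hrec
        have hcast : ((r.toNat : ℤ)) = r := Int.toNat_of_nonneg hr'
        rw [hcast] at hrec
        have hval : r * ∑ i ∈ Finset.range (t + 1), sigPart M (i + 1) * dd (t - i)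
            = (((t + 1 : ℕ)) : ℤ) * dd (t + 1) := by
          rw [Finset.mul_sum]
          have hassoc : ∑ i ∈ Finset.range (t + 1), r * (sigPart M (i + 1) * dd (t - i))
              = ∑ i ∈ Finset.range (t + 1), r * sigPart M (i + 1) * dd (t - i) :=
            Finset.sum_congr rfl fun i _ => by ring
          rw [hassoc, ← hrec]
        rw [hval, PySem.Int.floordiv_eq_ediv_of_pos (by exact_mod_cast Nat.succ_pos t),
          Int.mul_ediv_cancel_left _ (by exact_mod_cast Nat.succ_ne_zero t)]
        rw [List.range_succ (n := t + 1), List.map_append, List.map_singleton]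
  exact main M (le_refl M)


-- Initial state of both algorithms: the constant series 1.
lemma rep_init (M : ℕ) :
    PvRep ((List.replicate (M + 1) (0 : ℤ)).set 0 1) M
      (fun i => (PowerSeries.coeff i) (1 : PowerSeries ℤ)) := by
  have hbase : PvRep (List.replicate (M + 1) (0 : ℤ)) M (fun _ => (0 : ℤ)) :=
    ⟨by simp, fun j hj => by
      rw [List.getD_eq_getElem _ 0 (by simp; omega), List.getElem_replicate]⟩
  refine pvRep_congr (pvRep_set hbase 0 (Nat.zero_le M) 1) fun i hi => ?_
  rw [PowerSeries.coeff_one]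

-- ===== VERDICT (by name: the statement is the Claim_ definition above) =====
theorem framed_jordan_quiver_coha_dims_spec : Claim_equal_framed_jordan_quiver_coha_dims := by
  intro N r hDom hPre
  unfold Spec_framed_jordan_quiver_coha_dims
  obtain ⟨hN, hror⟩ := hPre
  set M := N.toNat with hMdef
  have hNM : N = (M : ℤ) := by omega
  have hNat : (((M : ℤ)) + 1).toNat = M + 1 := by omega
  have hror' : 0 ≤ r ∨ M = 0 := by rcases hror with h | h; exacts [Or.inl h, Or.inr (by omega)]
  have hA : framed_jordan_quiver_coha_dims N r
      = (List.range (M + 1)).map (fun i => (PowerSeries.coeff i) (psF M r.toNat)) := by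
    simp only [framed_jordan_quiver_coha_dims]
    rw [hNM, hNat]
    exact pvRep_ext (outerA M r _ (rep_init M))
  have hB : framed_jordan_quiver_coha_dims_alt N r
      = (List.range (M + 1)).map (fun i => (PowerSeries.coeff i) (psF M r.toNat)) := by
    simp only [framed_jordan_quiver_coha_dims_alt]
    rw [hNM, hNat]
    exact mainB M r hror' _ (sieveOuter M)
  rw [hA, hB]
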